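-- pv_equiv track=rewrite | github.com/sinlyu/High | cmake/scripts/glsl_to_header.py | write_indent
-- ===== SOURCE A (Python) =====
-- def write_indent(text, tab_count=0):
--     code_tab_size = 4
--     contents = ''
--     indent = ''
--
--     lines = text.split('\n')
--
--     if tab_count > 0:
--         indent += ' ' * (code_tab_size * tab_count)
--
--     for line in lines:
--         contents += f'{indent}{line}\n'
--
--     return contents
-- ===== SOURCE B (Python) =====
-- def write_indent(text, tab_count=0):
--     indent = ' ' * (4 * tab_count) if tab_count > 0 else ''
--     return indent + text.replace('\n', '\n' + indent) + '\n'
-- ===== Notes on version B (the rewrite author's own statement) =====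
-- stated objective: simpler
-- what changed: B computes the indent string once and returns a single expression (indent, then the text with the indent inserted after every newline via one replace call, then a trailing newline), with no line list and no loop, instead of A's split-into-lines-and-fold accumulation.
import Mathlib
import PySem

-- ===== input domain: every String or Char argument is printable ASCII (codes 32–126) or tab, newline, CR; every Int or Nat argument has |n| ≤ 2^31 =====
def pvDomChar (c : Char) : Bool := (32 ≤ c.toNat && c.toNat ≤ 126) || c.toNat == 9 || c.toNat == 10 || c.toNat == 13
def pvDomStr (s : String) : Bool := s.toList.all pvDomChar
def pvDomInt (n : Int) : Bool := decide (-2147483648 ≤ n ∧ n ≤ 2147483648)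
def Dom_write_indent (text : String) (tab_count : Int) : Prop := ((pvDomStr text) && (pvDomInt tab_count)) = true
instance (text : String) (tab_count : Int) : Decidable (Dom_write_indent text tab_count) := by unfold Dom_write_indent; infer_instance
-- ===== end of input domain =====

-- B replaces A's split-into-lines loop by one indent computation and a single replace expression; objective: simpler (same cost).

-- ===== PORT A =====
def write_indent (text : String) (tab_count : Int) : String :=
  let code_tab_size : Int := 4
  let contents : String := ""
  let indent : String := ""
  let lines : List String := (PySem.Str.split? text "\n").getD []
  let indent : String :=
    if tab_count > 0 then indent ++ String.ofList (List.replicate (code_tab_size * tab_count).toNat ' ')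
    else indent
  lines.foldl (fun contents line => contents ++ indent ++ line ++ "\n") contents

-- ===== PORT B =====
def write_indent_alt (text : String) (tab_count : Int) : String :=
  let indent : String :=
    if tab_count > 0 then String.ofList (List.replicate (4 * tab_count).toNat ' ') else ""
  indent ++ PySem.Str.replace text "\n" ("\n" ++ indent) ++ "\n"

-- ===== PRECONDITION & SPEC =====
def Spec_write_indent (text : String) (tab_count : Int) (out : String) : Prop := out = write_indent_alt text tab_count
instance (text : String) (tab_count : Int) (out : String) : Decidable (Spec_write_indent text tab_count out) := by unfold Spec_write_indent; infer_instance

-- ===== CLAIM (what is proved, stated in full; the proofs are below) =====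
def Claim_equal_write_indent : Prop := ∀ (text : String) (tab_count : Int), Dom_write_indent text tab_count → Spec_write_indent text tab_count (write_indent text tab_count)

-- ===== LEMMAS AND PROOFS =====

/-- Simple spec of splitting on '\n', carrying the current (reversed-free) prefix. -/
def splitSpec (pre : List Char) : List Char → List (List Char)
  | [] => [pre]
  | c :: r => if c = '\n' then pre :: splitSpec [] r else splitSpec (pre ++ [c]) r

/-- Simple spec of replacing every '\n' by `new`. -/
def repSpec (new : List Char) : List Char → List Char
  | [] => []
  | c :: r => if c = '\n' then new ++ repSpec new r else c :: repSpec new r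

theorem go_split (fuel : Nat) : ∀ (l cur acc : List Char) (hacc : List (List Char)),
    l.length ≤ fuel →
    PySem.Chars.splitOn.go ['\n'] fuel l cur hacc = hacc.reverse ++ splitSpec cur.reverse l := by
  induction fuel with
  | zero =>
    intro l cur acc hacc h
    have : l = [] := List.eq_nil_of_length_eq_zero (Nat.le_zero.mp h)
    subst this
    simp [PySem.Chars.splitOn.go, splitSpec]
  | succ n ih =>
    intro l cur acc hacc h
    cases l with
    | nil => simp [PySem.Chars.splitOn.go, splitSpec]
    | cons c rest =>
      by_cases hc : c = '\n'
      · subst hc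
        simp only [PySem.Chars.splitOn.go, List.isPrefixOf, BEq.rfl, Bool.true_and,
          List.isPrefixOf_nil_left, if_pos]
        rw [ih _ _ acc _ (by simpa using Nat.le_of_succ_le_succ h)]
        simp [splitSpec]
      · have hp : (['\n'].isPrefixOf (c :: rest)) = false := by
          simp [List.isPrefixOf]
          exact fun hh => absurd hh.symm hc
        simp only [PySem.Chars.splitOn.go, hp, if_neg, Bool.false_eq_true, not_false_iff]
        rw [ih _ _ acc _ (by simpa using Nat.le_of_succ_le_succ h)]
        simp [splitSpec, hc]

theorem go_replace (new : List Char) (fuel : Nat) : ∀ (l acc : List Char),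
    l.length ≤ fuel →
    PySem.Chars.replace.go ['\n'] new fuel l acc = acc.reverse ++ repSpec new l := by
  induction fuel with
  | zero =>
    intro l acc h
    have : l = [] := List.eq_nil_of_length_eq_zero (Nat.le_zero.mp h)
    subst this
    simp [PySem.Chars.replace.go, repSpec]
  | succ n ih =>
    intro l acc h
    cases l with
    | nil => simp [PySem.Chars.replace.go, repSpec]
    | cons c rest =>
      by_cases hc : c = '\n'
      · subst hc
        simp only [PySem.Chars.replace.go, List.isPrefixOf, BEq.rfl, Bool.true_and,
          List.isPrefixOf_nil_left, if_pos]
        rw [ih _ _ (by simpa using Nat.le_of_succ_le_succ h)]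
        simp [repSpec]
      · have hp : (['\n'].isPrefixOf (c :: rest)) = false := by
          simp [List.isPrefixOf]
          exact fun hh => absurd hh.symm hc
        simp only [PySem.Chars.replace.go, hp, if_neg, Bool.false_eq_true, not_false_iff]
        rw [ih _ _ (by simpa using Nat.le_of_succ_le_succ h)]
        simp [repSpec, hc]

theorem foldl_toList (ind : List Char) : ∀ (ls : List (List Char)) (a : String),
    ((ls.map String.ofList).foldl
        (fun c s => c ++ String.ofList ind ++ s ++ "\n") a).toList
      = ls.foldl (fun c s => c ++ ind ++ s ++ ['\n']) a.toList := by
  intro ls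
  induction ls with
  | nil => intro a; simp
  | cons x xs ih =>
    intro a
    simp only [List.map_cons, List.foldl_cons, ih]
    congr 1
    simp [String.toList_append]

theorem flatMap_splitSpec (ind : List Char) : ∀ (l pre : List Char),
    (splitSpec pre l).foldl (fun c s => c ++ ind ++ s ++ ['\n']) []
      = ind ++ pre ++ repSpec ('\n' :: ind) l ++ ['\n'] := by
  have key : ∀ (l pre a : List Char),
      (splitSpec pre l).foldl (fun c s => c ++ ind ++ s ++ ['\n']) a
        = a ++ ind ++ pre ++ repSpec ('\n' :: ind) l ++ ['\n'] := by
    intro l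
    induction l with
    | nil => intro pre a; simp [splitSpec, repSpec]
    | cons c r ih =>
      intro pre a
      by_cases hc : c = '\n'
      · subst hc
        rw [show splitSpec pre ('\n' :: r) = pre :: splitSpec [] r from by simp [splitSpec],
          List.foldl_cons, ih,
          show repSpec ('\n' :: ind) ('\n' :: r) = ('\n' :: ind) ++ repSpec ('\n' :: ind) r
            from by simp [repSpec]]
        simp
      · simp only [splitSpec, if_neg hc, repSpec, ih]
        simp [hc]
  intro l pre
  simpa using key l pre []

-- ===== VERDICT (by name: the statement is the Claim_ definition above) =====
theorem write_indent_spec : Claim_equal_write_indent := by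
  intro text tab_count _
  unfold Spec_write_indent write_indent write_indent_alt
  have hsplit : (PySem.Str.split? text "\n").getD []
      = (PySem.Chars.splitOn text.toList ['\n']).map String.ofList := by
    simp [PySem.Str.split?, PySem.Chars.split?]
  have hSO : PySem.Chars.splitOn text.toList ['\n'] = splitSpec [] text.toList := by
    simpa [PySem.Chars.splitOn] using
      go_split (text.toList.length + 1) text.toList [] [] [] (by omega)
  have hrep : ∀ ind : List Char,
      PySem.Chars.replace text.toList ['\n'] ('\n' :: ind)
        = repSpec ('\n' :: ind) text.toList := by
    intro ind
    simp only [PySem.Chars.replace]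
    rw [if_neg (by simp)]
    simpa using go_replace ('\n' :: ind) text.toList.length text.toList [] (le_refl _)
  apply String.toList_injective
  by_cases htc : tab_count > 0
  · simp only [if_pos htc]
    have hA := foldl_toList (List.replicate (4 * tab_count).toNat ' ')
      (splitSpec [] text.toList) ""
    rw [hsplit, hSO]
    rw [show ("" : String) ++ String.ofList (List.replicate (4 * tab_count).toNat ' ')
        = String.ofList (List.replicate (4 * tab_count).toNat ' ') from by
      apply String.toList_injective; simp]
    rw [hA, show ("" : String).toList = ([] : List Char) from by simp, flatMap_splitSpec]
    simp [PySem.Str.replace, hrep]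
  · simp only [if_neg htc]
    have hA := foldl_toList [] (splitSpec [] text.toList) ""
    rw [hsplit, hSO]
    rw [show ("" : String) = String.ofList [] from by apply String.toList_injective; simp] at hA ⊢
    rw [hA, show (String.ofList ([] : List Char)).toList = ([] : List Char) from by simp,
      flatMap_splitSpec]
    simp [PySem.Str.replace, hrep]
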